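-- pv_equiv track=rewrite | github.com/vnagpal25/advent-of-code | 2015/code/8.py | part2
-- ===== SOURCE A (Python) =====
-- def part2(puzzle: str):
--     total = 0
--     for string in puzzle.splitlines():
--         # escape all backslashes
--         encoded = string.replace("\\", "\\\\")
--
--         # escape all quotes
--         encoded = encoded.replace('"', '\\"')
--
--         # preceding and following quote
--         encoded = f'"{encoded}"'
--         total += len(encoded) - len(string)
--     return total
-- ===== SOURCE B (Python) =====
-- def part2(puzzle: str):
--     total = 0
--     for line in puzzle.splitlines():
--         # encoding adds the two surrounding quotes plus one escape backslash
--         # per backslash or quote in the line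
--         total += 2 + line.count('\\') + line.count('"')
--     return total
-- ===== Notes on version B (the rewrite author's own statement) =====
-- stated objective: simpler
-- what changed: B never builds the escaped string: it computes each line's length increase in closed form as 2 + count('\') + count('"') and accumulates that arithmetically.
import Mathlib
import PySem

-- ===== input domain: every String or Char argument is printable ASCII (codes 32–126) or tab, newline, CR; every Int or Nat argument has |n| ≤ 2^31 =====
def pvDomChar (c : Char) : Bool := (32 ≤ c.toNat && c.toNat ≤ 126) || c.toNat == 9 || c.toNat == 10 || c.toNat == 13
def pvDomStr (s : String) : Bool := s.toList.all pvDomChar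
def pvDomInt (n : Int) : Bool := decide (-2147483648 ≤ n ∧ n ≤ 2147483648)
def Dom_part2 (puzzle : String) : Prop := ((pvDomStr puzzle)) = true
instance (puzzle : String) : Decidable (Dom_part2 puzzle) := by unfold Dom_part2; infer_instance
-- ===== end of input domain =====

-- B avoids building the three intermediate escaped strings per line, computing the
-- per-line length increase in closed form as 2 + count('\') + count('"'); objective: simpler.

-- ===== PORT A =====
-- loop body of A: build the escaped string and add its length difference
def part2Body (total : Int) (string : String) : Int :=
  -- encoded = string.replace("\\", "\\\\")
  let encoded := PySem.Str.replace string "\\" "\\\\"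
  -- encoded = encoded.replace('"', '\\"')
  let encoded := PySem.Str.replace encoded "\"" "\\\""
  -- encoded = f'"{encoded}"'
  let encoded := "\"" ++ encoded ++ "\""
  total + ((PySem.Str.len encoded : Int) - (PySem.Str.len string : Int))

def part2 (puzzle : String) : Int :=
  (PySem.Str.splitlines puzzle).foldl part2Body 0

-- ===== PORT B =====
def part2_alt (puzzle : String) : Int :=
  (PySem.Str.splitlines puzzle).foldl
    (fun total line =>
      total + (2 + (PySem.Str.count line "\\" : Int) + (PySem.Str.count line "\"" : Int)))
    0

-- ===== PRECONDITION & SPEC =====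
def Spec_part2 (puzzle : String) (out : Int) : Prop := out = part2_alt puzzle
instance (puzzle : String) (out : Int) : Decidable (Spec_part2 puzzle out) := by unfold Spec_part2; infer_instance

-- ===== CLAIM (what is proved, stated in full; the proofs are below) =====
def Claim_equal_part2 : Prop := ∀ (puzzle : String), Dom_part2 puzzle → Spec_part2 puzzle (part2 puzzle)

-- ===== LEMMAS AND PROOFS =====

-- count.go with a single-character needle is List.count
theorem count_go_single (a : Char) : ∀ (l : List Char) (fuel acc : Nat),
    l.length ≤ fuel → PySem.Chars.count.go [a] fuel l acc = acc + l.count a := by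
  intro l
  induction l with
  | nil => intro fuel acc _; cases fuel <;> simp [PySem.Chars.count.go]
  | cons c t ih =>
    intro fuel acc h
    cases fuel with
    | zero => simp at h
    | succ f =>
      simp only [PySem.Chars.count.go, List.isPrefixOf]
      by_cases hc : a = c
      · subst hc
        simp only [BEq.rfl, Bool.true_and, if_true,
          List.length_singleton, List.drop_succ_cons, List.drop_zero]
        rw [ih f (acc + 1) (by simpa using h)]
        simp; omega
      · have hbc : (a == c) = false := by simp [hc]
        simp only [hbc, Bool.false_and, Bool.false_eq_true, if_false]
        rw [ih f acc (by simpa using h)]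
        simp [Ne.symm hc]

theorem count_single (a : Char) (l : List Char) :
    PySem.Chars.count l [a] = l.count a := by
  simp [PySem.Chars.count, count_go_single a l l.length 0 le_rfl]

-- replace with a single-character needle is a flatMap
theorem replace_go_single (a : Char) (new : List Char) : ∀ (l : List Char) (fuel : Nat) (acc : List Char),
    l.length ≤ fuel →
    PySem.Chars.replace.go [a] new fuel l acc
      = acc.reverse ++ l.flatMap (fun c => if a = c then new else [c]) := by
  intro l
  induction l with
  | nil => intro fuel acc _; cases fuel <;> simp [PySem.Chars.replace.go]
  | cons c t ih =>
    intro fuel acc h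
    cases fuel with
    | zero => simp at h
    | succ f =>
      simp only [PySem.Chars.replace.go, List.isPrefixOf]
      by_cases hc : a = c
      · subst hc
        simp only [BEq.rfl, Bool.true_and, if_true,
          List.length_singleton, List.drop_succ_cons, List.drop_zero]
        rw [ih f (new.reverse ++ acc) (by simpa using h)]
        simp
      · have hbc : (a == c) = false := by simp [hc]
        simp only [hbc, Bool.false_and, Bool.false_eq_true, if_false]
        rw [ih f (c :: acc) (by simpa using h)]
        simp [hc]

theorem replace_single (a : Char) (new l : List Char) :
    PySem.Chars.replace l [a] new = l.flatMap (fun c => if a = c then new else [c]) := by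
  simp [PySem.Chars.replace, replace_go_single a new l l.length [] le_rfl]

-- length of the doubly-escaped line
theorem escaped_length (l : List Char) :
    (PySem.Chars.replace (PySem.Chars.replace l ['\\'] ['\\', '\\']) ['"'] ['\\', '"']).length
      = l.length + l.count '\\' + l.count '"' := by
  rw [replace_single, replace_single]
  induction l with
  | nil => simp
  | cons c t ih =>
    rw [List.flatMap_cons, List.flatMap_append, List.length_append, ih]
    by_cases h1 : c = '\\'
    · subst h1; simp; omega
    · by_cases h2 : c = '"'
      · subst h2; simp [h1]; omega
      · simp [Ne.symm h1, Ne.symm h2, h1, h2]; omega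

-- per-line agreement of the two loop bodies
theorem step_eq (total : Int) (s : String) :
    part2Body total s
      = total + (2 + (PySem.Str.count s "\\" : Int) + (PySem.Str.count s "\"" : Int)) := by
  have hq : ("\"" : String).toList = ['"'] := rfl
  have hb : ("\\" : String).toList = ['\\'] := rfl
  have hbb : ("\\\\" : String).toList = ['\\', '\\'] := rfl
  have hbq : ("\\\"" : String).toList = ['\\', '"'] := rfl
  simp only [part2Body, PySem.Str.len, PySem.Str.count, String.toList_append,
    PySem.Str.toList_replace, hq, hb, hbb, hbq, count_single,
    List.length_append, List.length_cons, List.length_nil, escaped_length]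
  push_cast
  omega

-- the two folds agree for every accumulator
theorem fold_eq : ∀ (ls : List String) (acc : Int),
    ls.foldl part2Body acc
    = ls.foldl
      (fun total line =>
        total + (2 + (PySem.Str.count line "\\" : Int) + (PySem.Str.count line "\"" : Int))) acc := by
  intro ls
  induction ls with
  | nil => intro acc; simp only [List.foldl_nil]
  | cons s t ih =>
    intro acc
    simp only [List.foldl_cons]
    rw [step_eq, ih]

-- ===== VERDICT (by name: the statement is the Claim_ definition above) =====
theorem part2_spec : Claim_equal_part2 := by
  intro puzzle _
  unfold Spec_part2 part2 part2_alt
  exact fold_eq (PySem.Str.splitlines puzzle) 0
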